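-- pv_equiv track=rewrite | github.com/pppxiyu/FloodCast | utils/features.py | update_lag_w_forward
-- ===== SOURCE A (Python) =====
-- def update_lag_w_forward(lag, forward):
--     # USE: update lag list using forward list
--     #      new lag list is respect to the furthest time step in the forward list
--     #      the basic idea of the conversion is moving the "0" tick to before each of the forward item
--     # INPUT: both are lists
--     # OUTPUT: updated lag list
--
--     count = 0
--     for f in forward:
--         lag = [l + (f - 1) for l in lag]
--         forward = [ff - (f - 1) for ff in forward]
--         count += 1
--         if count > 1:
--             lag = [1] + lag
--
--     return lag
-- ===== SOURCE B (Python) =====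
-- def update_lag_w_forward(lag, forward):
--     # One pass: each original lag element just gains total = sum(f-1);
--     # the prepended 1-ticks (one per iteration after the first) accumulate
--     # suffix sums of the offsets, built front-to-back with a running accumulator.
--     offs = [f - 1 for f in forward]
--     total = sum(offs)
--     head = []
--     acc = 1
--     for o in reversed(offs[2:]):
--         head.append(acc)
--         acc += o
--     if len(offs) >= 2:
--         head.append(acc)
--     return head + [l + total for l in lag]
-- ===== Notes on version B (the rewrite author's own statement) =====
-- stated objective: faster
-- what changed: B exploits that the loop iterates the original forward list (the in-loop reassignment is dead), so it assembles the result in one pass from the total and running suffix sums of the offsets f-1, instead of re-mapping the growing lag list on every iteration.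
import Mathlib
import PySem

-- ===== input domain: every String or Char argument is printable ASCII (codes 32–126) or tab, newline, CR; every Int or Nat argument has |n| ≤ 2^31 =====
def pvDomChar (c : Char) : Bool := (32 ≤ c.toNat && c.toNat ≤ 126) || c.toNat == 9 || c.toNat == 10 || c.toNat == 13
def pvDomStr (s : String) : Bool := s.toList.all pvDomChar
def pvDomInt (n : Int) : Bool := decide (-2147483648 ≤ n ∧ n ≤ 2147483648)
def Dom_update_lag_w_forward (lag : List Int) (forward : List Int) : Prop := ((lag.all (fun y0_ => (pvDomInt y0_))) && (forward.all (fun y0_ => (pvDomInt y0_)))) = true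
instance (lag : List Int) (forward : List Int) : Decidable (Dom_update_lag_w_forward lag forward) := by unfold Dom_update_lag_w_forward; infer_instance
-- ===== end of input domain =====

-- B replaces A's repeated whole-list re-mapping with one-pass assembly from the total and
-- suffix sums of the offsets (f - 1); return values only, no argument is mutated.

-- ===== PORT A =====
-- A's loop body; the state is (lag, forward-variable, count). Python's `for f in forward`
-- iterates the ORIGINAL list even though `forward` is reassigned in the body, so the fold
-- runs over the original `forward`, carrying the (never re-read) reassigned list as state.
def pvStepA (st : List Int × List Int × Int) (f : Int) : List Int × List Int × Int :=
  let lag' := st.1.map (fun l => l + (f - 1))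
  let fwd' := st.2.1.map (fun ff => ff - (f - 1))
  let count' := st.2.2 + 1
  let lag'' := if count' > 1 then 1 :: lag' else lag'
  (lag'', fwd', count')

def update_lag_w_forward (lag : List Int) (forward : List Int) : List Int :=
  (forward.foldl pvStepA (lag, forward, 0)).1

-- ===== PORT B =====
-- offs[2:] is a slice with nonnegative start = List.drop 2 (exact).
def update_lag_w_forward_alt (lag : List Int) (forward : List Int) : List Int :=
  let offs := forward.map (fun f => f - 1)
  let total := offs.sum
  let st := (offs.drop 2).reverse.foldl
    (fun (p : List Int × Int) o => (p.1 ++ [p.2], p.2 + o)) ([], 1)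
  let head := if offs.length ≥ 2 then st.1 ++ [st.2] else st.1
  head ++ lag.map (fun l => l + total)

-- ===== PRECONDITION & SPEC =====
def Spec_update_lag_w_forward (lag : List Int) (forward : List Int) (out : List Int) : Prop := out = update_lag_w_forward_alt lag forward
instance (lag : List Int) (forward : List Int) (out : List Int) : Decidable (Spec_update_lag_w_forward lag forward out) := by unfold Spec_update_lag_w_forward; infer_instance

-- ===== CLAIM (what is proved, stated in full; the proofs are below) =====
def Claim_equal_update_lag_w_forward : Prop := ∀ (lag : List Int) (forward : List Int), Dom_update_lag_w_forward lag forward → Spec_update_lag_w_forward lag forward (update_lag_w_forward lag forward)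

-- ===== LEMMAS AND PROOFS =====

-- the head A builds while folding over the tail `r` of forward (one `1` per element,
-- each later incremented by the remaining offsets)
def pvHead (r : List Int) : List Int :=
  match r with
  | [] => []
  | _ :: r' => pvHead r' ++ [1 + (r'.map (fun f => f - 1)).sum]

theorem pvFoldA_char (fs : List Int) (lag fwd : List Int) (c : Int) (hc : 1 ≤ c) :
    (fs.foldl pvStepA (lag, fwd, c)).1
      = pvHead fs ++ lag.map (fun l => l + (fs.map (fun f => f - 1)).sum) := by
  induction fs generalizing lag fwd c with
  | nil => simp [pvHead]
  | cons f r ih =>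
    have hgt : c + 1 > 1 := by omega
    simp only [List.foldl_cons, pvStepA, if_pos hgt]
    rw [ih _ _ _ (by omega)]
    simp [pvHead, List.map_map]

theorem pvFoldB_char (r : List Int) :
    ((r.map (fun f => f - 1)).reverse.foldl
        (fun (p : List Int × Int) o => (p.1 ++ [p.2], p.2 + o)) ([], 1))
      = (pvHead r, 1 + (r.map (fun f => f - 1)).sum) := by
  induction r with
  | nil => simp [pvHead]
  | cons f r' ih =>
    simp only [List.map_cons, List.reverse_cons, List.foldl_append, ih]
    simp [pvHead]
    ring

theorem update_lag_w_forward_eq (lag forward : List Int) :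
    update_lag_w_forward lag forward = update_lag_w_forward_alt lag forward := by
  unfold update_lag_w_forward update_lag_w_forward_alt
  match forward with
  | [] => simp
  | [f1] => simp [pvStepA]
  | f1 :: f2 :: r2 =>
    have hstep : pvStepA (lag, f1 :: f2 :: r2, 0) f1
        = (lag.map (fun l => l + (f1 - 1)),
           (f1 :: f2 :: r2).map (fun ff => ff - (f1 - 1)), 1) := by
      simp [pvStepA]
    rw [List.foldl_cons, hstep, pvFoldA_char (f2 :: r2) _ _ 1 le_rfl]
    have hdrop : ((f1 :: f2 :: r2).map (fun f => f - 1)).drop 2 = r2.map (fun f => f - 1) := by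
      simp
    simp only [hdrop, pvFoldB_char r2]
    simp [pvHead, List.map_map]

-- ===== VERDICT (by name: the statement is the Claim_ definition above) =====
theorem update_lag_w_forward_spec : Claim_equal_update_lag_w_forward := by
  intro lag forward _
  exact update_lag_w_forward_eq lag forward
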